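-- pv_equiv track=rewrite | github.com/schitresh/interviewbit | string/vowel-and-consonant-substrings.py | solve
-- ===== SOURCE A (Python) =====
-- def solve(A):
--     mod = 10 ** 9 + 7
--     count = 0
--     vowels = 0
--     consonants = 0
--
--     for i in range(len(A)):
--         if A[i] in 'aeiou':
--             vowels += 1
--             count = (count + consonants) % mod
--         else:
--             consonants += 1
--             count = (count + vowels) % mod
--
--     return count
-- ===== SOURCE B (Python) =====
-- def solve(A):
--     vowels = sum(1 for c in A if c in 'aeiou')
--     return (vowels * (len(A) - vowels)) % (10 ** 9 + 7)
-- ===== Notes on version B (the rewrite author's own statement) =====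
-- stated objective: simpler
-- what changed: Replaces the per-character accumulation of a running count with the closed form: the answer is vowels*consonants mod 1e9+7, so B tallies vowels in one generator-sum and returns the product mod once (no per-step mod arithmetic).
import Mathlib
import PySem

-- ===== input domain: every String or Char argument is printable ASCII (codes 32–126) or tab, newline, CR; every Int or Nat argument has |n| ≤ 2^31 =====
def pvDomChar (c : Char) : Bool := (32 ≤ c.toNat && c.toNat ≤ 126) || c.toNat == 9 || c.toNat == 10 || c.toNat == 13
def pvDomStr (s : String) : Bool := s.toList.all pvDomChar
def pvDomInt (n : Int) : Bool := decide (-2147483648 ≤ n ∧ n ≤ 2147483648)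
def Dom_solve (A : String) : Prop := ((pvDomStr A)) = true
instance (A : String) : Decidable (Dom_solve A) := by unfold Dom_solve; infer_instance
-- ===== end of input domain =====

-- B replaces A's per-character accumulation of the running pair count with the
-- closed form vowels * consonants (simpler; same O(n) cost).

-- ===== PORT A =====
-- the membership test `c in 'aeiou'`
def pvIsVowel (c : Char) : Bool := c ∈ ['a', 'e', 'i', 'o', 'u']

-- for i in range(len(A)) reading A[i] in order = left fold over the characters,
-- state (count, vowels, consonants)
def solve (A : String) : Int :=
  let m : Int := 10 ^ 9 + 7
  let r : Int × Int × Int := A.toList.foldl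
    (fun s c =>
      if pvIsVowel c then
        ((s.1 + s.2.2) % m, s.2.1 + 1, s.2.2)
      else
        ((s.1 + s.2.1) % m, s.2.1, s.2.2 + 1))
    (0, 0, 0)
  r.1

-- ===== PORT B =====
def solve_alt (A : String) : Int :=
  let vowels : Int := (A.toList.filter (fun c => c ∈ ['a', 'e', 'i', 'o', 'u'])).length
  (vowels * ((A.toList.length : Int) - vowels)) % (10 ^ 9 + 7)

-- ===== PRECONDITION & SPEC =====
def Spec_solve (A : String) (out : Int) : Prop := out = solve_alt A
instance (A : String) (out : Int) : Decidable (Spec_solve A out) := by unfold Spec_solve; infer_instance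

-- ===== CLAIM (what is proved, stated in full; the proofs are below) =====
def Claim_equal_solve : Prop := ∀ (A : String), Dom_solve A → Spec_solve A (solve A)

-- ===== LEMMAS AND PROOFS =====

-- the fold step of A's port
def pvStep (m : Int) (s : Int × Int × Int) (c : Char) : Int × Int × Int :=
  if pvIsVowel c then
    ((s.1 + s.2.2) % m, s.2.1 + 1, s.2.2)
  else
    ((s.1 + s.2.1) % m, s.2.1, s.2.2 + 1)

-- number of vowels in a character list, as an Int
def pvNV (l : List Char) : Int := (l.countP pvIsVowel : Int)

theorem pvNV_cons (c : Char) (t : List Char) :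
    pvNV (c :: t) = pvNV t + (if pvIsVowel c then 1 else 0) := by
  cases h : pvIsVowel c <;> simp [pvNV, h]

-- Loop invariant: starting A's fold from ((v*c) % m, v, c) yields
-- ((v + V)*(c + C)) % m in the first component, where V/C count remaining vowels/consonants.
theorem pvFold_inv (m : Int) (l : List Char) :
    ∀ (v c : Int),
      (l.foldl (pvStep m) ((v * c) % m, v, c)).1
        = ((v + pvNV l) * (c + ((l.length : Int) - pvNV l))) % m := by
  induction l with
  | nil => intro v c; simp [pvNV]
  | cons ch t ih =>
    intro v c
    by_cases h : pvIsVowel ch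
    · have : pvStep m ((v * c) % m, v, c) ch = (((v + 1) * c) % m, v + 1, c) := by
        simp [pvStep, h, Int.emod_add_emod]; ring_nf
      rw [List.foldl_cons, this, ih (v + 1) c]
      rw [pvNV_cons]; simp [h]; ring_nf
    · have : pvStep m ((v * c) % m, v, c) ch = ((v * (c + 1)) % m, v, c + 1) := by
        simp [pvStep, h, Int.emod_add_emod]; ring_nf
      rw [List.foldl_cons, this, ih v (c + 1)]
      rw [pvNV_cons]; simp [h]; ring_nf

-- ===== VERDICT (by name: the statement is the Claim_ definition above) =====
theorem solve_spec : Claim_equal_solve := by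
  intro A _
  show solve A = solve_alt A
  have h := pvFold_inv (10 ^ 9 + 7) A.toList 0 0
  simp only [Int.zero_mul, Int.zero_emod, Int.zero_add] at h
  have hfun : pvIsVowel = (fun c => decide (c ∈ ['a', 'e', 'i', 'o', 'u'])) := by
    funext c; simp [pvIsVowel]
  have hfilter : pvNV A.toList
      = ((A.toList.filter (fun c => c ∈ ['a', 'e', 'i', 'o', 'u'])).length : Int) := by
    simp [pvNV, List.countP_eq_length_filter, hfun]
  rw [hfilter] at h
  simpa [solve, solve_alt, pvStep] using h
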